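-- pv_equiv track=rewrite | github.com/sercxanto/small_scripts | fiducia2homebank.py | fix_multilinenote
-- ===== SOURCE A (Python) =====
-- def fix_multilinenote(in_note):
--     '''Fixes the newlines in the note field'''
--     out_note = ""
--     first_newline = True
--
--     for char in in_note:
--         if char == "\n":
--             if first_newline:
--                 out_note = out_note + " "
--                 first_newline = False
--             else:
--                 pass
--         else:
--             out_note = out_note + char
--
--     return out_note
-- ===== SOURCE B (Python) =====
-- def fix_multilinenote(in_note):
--     '''Fixes the newlines in the note field'''
--     idx = in_note.find("\n")
--     if idx == -1:
--         return in_note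
--     return in_note[:idx] + " " + in_note[idx + 1:].replace("\n", "")
-- ===== Notes on version B (the rewrite author's own statement) =====
-- stated objective: idiomatic
-- what changed: Replaces the char-by-char growing-string loop with boolean state by an index of the first newline plus slicing and a single library replace on the suffix, avoiding quadratic string concatenation.
import Mathlib
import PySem

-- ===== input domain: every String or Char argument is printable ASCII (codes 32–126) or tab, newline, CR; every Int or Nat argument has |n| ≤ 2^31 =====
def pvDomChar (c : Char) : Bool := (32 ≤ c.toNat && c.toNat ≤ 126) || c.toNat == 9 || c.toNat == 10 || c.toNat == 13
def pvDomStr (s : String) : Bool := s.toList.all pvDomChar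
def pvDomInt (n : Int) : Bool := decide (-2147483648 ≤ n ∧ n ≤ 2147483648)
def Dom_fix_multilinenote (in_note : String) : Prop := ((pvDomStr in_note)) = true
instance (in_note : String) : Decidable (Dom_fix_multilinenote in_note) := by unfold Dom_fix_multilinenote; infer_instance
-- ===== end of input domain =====

-- B replaces A's char-by-char growing-string loop by find + slices + one replace on the suffix (idiomatic).


-- ===== PORT A =====
-- loop body: state = (out_note, first_newline)
def fixStep (st : List Char × Bool) (c : Char) : List Char × Bool :=
  if c = '\n' then
    if st.2 then (st.1 ++ [' '], false) else st
  else
    (st.1 ++ [c], st.2)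

def fix_multilinenote (in_note : String) : String :=
  String.ofList (in_note.toList.foldl fixStep ([], true)).1

-- ===== PORT B =====
def fix_multilinenote_alt (in_note : String) : String :=
  let cs := in_note.toList
  let idx := PySem.Chars.find cs ['\n']
  if idx = -1 then in_note
  else String.ofList (PySem.Chars.slice cs none (some idx) ++ [' '] ++
    PySem.Chars.replace (PySem.Chars.slice cs (some (idx + 1)) none) ['\n'] [])

-- ===== PRECONDITION & SPEC =====
def Spec_fix_multilinenote (in_note : String) (out : String) : Prop := out = fix_multilinenote_alt in_note
instance (in_note : String) (out : String) : Decidable (Spec_fix_multilinenote in_note out) := by unfold Spec_fix_multilinenote; infer_instance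

-- ===== CLAIM (what is proved, stated in full; the proofs are below) =====
def Claim_equal_fix_multilinenote : Prop := ∀ (in_note : String), Dom_fix_multilinenote in_note → Spec_fix_multilinenote in_note (fix_multilinenote in_note)

-- ===== LEMMAS AND PROOFS =====

-- A's loop before the first newline: copies characters, flag stays true
theorem foldl_fixStep_no_nl (cs : List Char) (h : '\n' ∉ cs) (acc : List Char) :
    cs.foldl fixStep (acc, true) = (acc ++ cs, true) := by
  induction cs generalizing acc with
  | nil => simp
  | cons c t ih =>
    have hc : c ≠ '\n' := fun hc => h (by simp [hc])
    have ht : '\n' ∉ t := fun hm => h (by simp [hm])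
    simp [fixStep, hc, ih ht]

-- A's loop after the first newline: filters out newlines, flag stays false
theorem foldl_fixStep_after (cs : List Char) (acc : List Char) :
    cs.foldl fixStep (acc, false) = (acc ++ cs.filter (fun c => !(c == '\n')), false) := by
  induction cs generalizing acc with
  | nil => simp
  | cons c t ih =>
    by_cases hc : c = '\n' <;> simp [fixStep, hc, ih]

-- find.go on a string without the (single-char) needle
theorem findGo_not_mem (cs : List Char) (h : '\n' ∉ cs) (k : Nat) :
    PySem.Chars.find.go ['\n'] cs k = -1 := by
  induction cs generalizing k with
  | nil => simp [PySem.Chars.find.go]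
  | cons c t ih =>
    have hc : c ≠ '\n' := fun hc => h (by simp [hc])
    have ht : '\n' ∉ t := fun hm => h (by simp [hm])
    simp [PySem.Chars.find.go, List.isPrefixOf, Ne.symm hc, ih ht]

-- find.go finds the first newline at offset p.length
theorem findGo_first (p rest : List Char) (h : '\n' ∉ p) (k : Nat) :
    PySem.Chars.find.go ['\n'] (p ++ '\n' :: rest) k = (k : Int) + p.length := by
  induction p generalizing k with
  | nil => simp [PySem.Chars.find.go, List.isPrefixOf]
  | cons c t ih =>
    have hc : c ≠ '\n' := fun hc => h (by simp [hc])
    have ht : '\n' ∉ t := fun hm => h (by simp [hm])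
    simp only [List.cons_append, PySem.Chars.find.go, List.isPrefixOf]
    rw [if_neg (by simp [Ne.symm hc]), ih ht (k + 1)]
    simp only [List.length_cons]
    push_cast
    ring

-- replace.go with old = "\n", new = "" filters out newlines (fuel suffices)
theorem replaceGo_filter (cs : List Char) (acc : List Char) (fuel : Nat)
    (hfuel : cs.length ≤ fuel) :
    PySem.Chars.replace.go ['\n'] [] fuel cs acc =
      acc.reverse ++ cs.filter (fun c => !(c == '\n')) := by
  induction cs generalizing acc fuel with
  | nil => cases fuel <;> simp [PySem.Chars.replace.go]
  | cons c t ih =>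
    cases fuel with
    | zero => simp at hfuel
    | succ n =>
      have hn : t.length ≤ n := by simpa using hfuel
      by_cases hc : c = '\n'
      · simp only [PySem.Chars.replace.go, List.isPrefixOf, hc]
        rw [if_pos (by simp)]
        simp [ih _ _ hn]
      · simp only [PySem.Chars.replace.go, List.isPrefixOf]
        rw [if_neg (by simp [Ne.symm hc])]
        simp [ih _ _ hn, hc]

theorem replace_nl_filter (cs : List Char) :
    PySem.Chars.replace cs ['\n'] [] = cs.filter (fun c => !(c == '\n')) := by
  simpa using replaceGo_filter cs [] cs.length le_rfl

-- split a list at its first newline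
theorem exists_first_nl (cs : List Char) (h : '\n' ∈ cs) :
    ∃ p rest, cs = p ++ '\n' :: rest ∧ '\n' ∉ p := by
  induction cs with
  | nil => simp at h
  | cons c t ih =>
    by_cases hc : c = '\n'
    · exact ⟨[], t, by simp [hc], by simp⟩
    · obtain ⟨p, rest, heq, hp⟩ := ih (by
        rcases List.mem_cons.mp h with h1 | h1
        · exact absurd h1.symm hc
        · exact h1)
      exact ⟨c :: p, rest, by simp [heq], by simp [Ne.symm hc, hp]⟩

theorem fix_eq_alt (s : String) : fix_multilinenote s = fix_multilinenote_alt s := by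
  by_cases h : '\n' ∈ s.toList
  · obtain ⟨p, rest, heq, hp⟩ := exists_first_nl s.toList h
    have hA : fix_multilinenote s =
        String.ofList (p ++ ' ' :: rest.filter (fun c => !(c == '\n'))) := by
      unfold fix_multilinenote
      rw [heq, List.foldl_append, foldl_fixStep_no_nl p hp]
      simp [fixStep, foldl_fixStep_after]
    have hfind : PySem.Chars.find s.toList ['\n'] = (p.length : Int) := by
      unfold PySem.Chars.find
      rw [heq, findGo_first p rest hp 0]
      simp
    have hne : (p.length : Int) ≠ -1 := by omega
    unfold fix_multilinenote_alt
    simp only [hfind, if_neg hne, PySem.Chars.slice_eq_listSlice]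
    rw [PySem.List.slice_to_natCast]
    have : (p.length : Int) + 1 = ((p.length + 1 : Nat) : Int) := by push_cast; ring
    rw [this, PySem.List.slice_from_natCast, replace_nl_filter]
    rw [hA, heq]
    simp [List.drop_append, List.drop_eq_nil_of_le]
  · have hfind : PySem.Chars.find s.toList ['\n'] = -1 := by
      unfold PySem.Chars.find
      exact findGo_not_mem s.toList h 0
    unfold fix_multilinenote fix_multilinenote_alt
    rw [foldl_fixStep_no_nl s.toList h []]
    simp [hfind]

-- ===== VERDICT (by name: the statement is the Claim_ definition above) =====
theorem fix_multilinenote_spec : Claim_equal_fix_multilinenote := by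
  intro s _
  unfold Spec_fix_multilinenote
  exact fix_eq_alt s
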